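-- pv_equiv track=rewrite | github.com/warithr621/Comp-Programming | Codeforces/2093/D.py | recurse
-- ===== SOURCE A (Python) =====
-- def recurse(n, x, y):
--     if n == 0:
--         return 0
--     n -= 1
--     if x < (1 << n) and y < (1 << n):
--         return recurse(n, x, y)
--     elif x >= (1 << n) and y >= (1 << n):
--         return recurse(n, x - (1 << n), y - (1 << n)) + (1 << (2*n))
--     elif x >= (1 << n):
--         return recurse(n, x - (1 << n), y) + 2 * (1 << (2 * n))
--     else:
--         return recurse(n, x, y - (1 << n)) + 3 * (1 << (2 * n))
-- ===== SOURCE B (Python) =====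
-- def recurse(n, x, y):
--     res = 0
--     for k in range(n - 1, -1, -1):
--         p = 1 << k
--         if x < p and y < p:
--             pass
--         elif x >= p and y >= p:
--             x -= p
--             y -= p
--             res += 1 << (2 * k)
--         elif x >= p:
--             x -= p
--             res += 2 << (2 * k)
--         else:
--             y -= p
--             res += 3 << (2 * k)
--     return res
-- ===== Notes on version B (the rewrite author's own statement) =====
-- stated objective: simpler
-- what changed: Replaced the four-way self-recursion by a single iterative loop over bit levels k = n-1 .. 0 that maintains x, y and an accumulator, removing recursion (and its stack growth) entirely.
import Mathlib
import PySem

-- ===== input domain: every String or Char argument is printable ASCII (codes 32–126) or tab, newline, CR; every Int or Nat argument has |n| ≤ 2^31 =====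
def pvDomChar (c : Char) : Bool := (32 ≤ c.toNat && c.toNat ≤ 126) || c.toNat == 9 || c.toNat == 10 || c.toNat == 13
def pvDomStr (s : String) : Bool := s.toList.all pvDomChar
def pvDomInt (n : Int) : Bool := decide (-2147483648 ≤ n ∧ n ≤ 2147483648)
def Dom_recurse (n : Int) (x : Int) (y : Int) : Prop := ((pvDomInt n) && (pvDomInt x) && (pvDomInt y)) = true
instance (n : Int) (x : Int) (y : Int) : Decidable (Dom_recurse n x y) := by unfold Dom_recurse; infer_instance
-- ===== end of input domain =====

-- B replaces A's four-way self-recursion by a single iterative loop over bit levels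
-- (objective: simpler — no recursion, O(1) stack).

-- ===== PORT A =====
-- A recurses with n decremented each call; fuel = n.toNat is exact for 0 ≤ n (Pre_).
-- 1 << e (a nonnegative power of two) is ported as ((2 ^ e : Nat) : Int) — exact for e ≥ 0
def pow2 (e : Nat) : Int := ((2 ^ e : Nat) : Int)

def recurseNat : Nat → Int → Int → Int
  | 0, _, _ => 0
  | m + 1, x, y =>
    if x < pow2 m ∧ y < pow2 m then
      recurseNat m x y
    else if pow2 m ≤ x ∧ pow2 m ≤ y then
      recurseNat m (x - pow2 m) (y - pow2 m) + pow2 (2 * m)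
    else if pow2 m ≤ x then
      recurseNat m (x - pow2 m) y + 2 * pow2 (2 * m)
    else
      recurseNat m x (y - pow2 m) + 3 * pow2 (2 * m)

def recurse (n : Int) (x : Int) (y : Int) : Int := recurseNat n.toNat x y

-- ===== PORT B =====
-- one loop body step on the mutable state (x, y, res); k ≥ 0 inside the range, so 1 << k = pow2 k.toNat
def altStep (st : Int × Int × Int) (k : Int) : Int × Int × Int :=
  let x := st.1
  let y := st.2.1
  let res := st.2.2
  let p : Int := pow2 k.toNat
  if x < p ∧ y < p then (x, y, res)
  else if p ≤ x ∧ p ≤ y then (x - p, y - p, res + pow2 (2 * k.toNat))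
  else if p ≤ x then (x - p, y, res + 2 * pow2 (2 * k.toNat))
  else (x, y - p, res + 3 * pow2 (2 * k.toNat))

def recurse_alt (n : Int) (x : Int) (y : Int) : Int :=
  ((PySem.List.pyRange (n - 1) (-1) (-1)).foldl altStep (x, y, 0)).2.2

-- ===== PRECONDITION & SPEC =====
-- Pre_ excludes exactly n < 0, on which A raises ValueError (negative shift count
-- in 1 << (n-1)); A returns normally for every n ≥ 0.
def Pre_recurse (n : Int) (x : Int) (y : Int) : Prop := 0 ≤ n
instance (n : Int) (x : Int) (y : Int) : Decidable (Pre_recurse n x y) := by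
  unfold Pre_recurse; infer_instance

def pvWitness_recurse : Int × Int × Int := (3, 5, 6)

def Spec_recurse (n : Int) (x : Int) (y : Int) (out : Int) : Prop := out = recurse_alt n x y
instance (n : Int) (x : Int) (y : Int) (out : Int) : Decidable (Spec_recurse n x y out) := by
  unfold Spec_recurse; infer_instance

-- ===== CLAIM (what is proved, stated in full; the proofs are below) =====
def Claim_equal_recurse : Prop := ∀ (n : Int) (x : Int) (y : Int), Dom_recurse n x y → Pre_recurse n x y → Spec_recurse n x y (recurse n x y)


-- ===== LEMMAS AND PROOFS =====

-- loop invariant: folding B's step over [m-1, …, 0] adds exactly A's recursive value to res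
lemma foldl_altStep_eq (m : Nat) : ∀ x y res : Int,
    ((PySem.List.pyRange ((m : Int) - 1) (-1) (-1)).foldl altStep (x, y, res)).2.2
      = res + recurseNat m x y := by
  induction m with
  | zero =>
    intro x y res
    rw [show ((0 : Nat) : Int) - 1 = -1 by norm_num,
        PySem.List.pyRange_neg_one_eq_nil (le_refl (-1))]
    simp [recurseNat]
  | succ m ih =>
    intro x y res
    rw [show ((m + 1 : Nat) : Int) - 1 = (m : Int) by push_cast; ring,
        PySem.List.pyRange_neg_one_cons (by omega : (-1 : Int) < (m : Int))]
    rw [List.foldl_cons]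
    have hk : ((m : Int)).toNat = m := Int.toNat_natCast m
    by_cases h1 : x < pow2 m ∧ y < pow2 m
    · rw [show altStep (x, y, res) (m : Int) = (x, y, res) by
        simp [altStep, hk, h1]]
      rw [ih]
      simp [recurseNat, h1]
    · by_cases h2 : pow2 m ≤ x ∧ pow2 m ≤ y
      · rw [show altStep (x, y, res) (m : Int)
              = (x - pow2 m, y - pow2 m, res + pow2 (2 * m)) by
          simp [altStep, hk, h1, h2]]
        rw [ih]
        simp only [recurseNat, if_neg h1, if_pos h2]
        ring
      · by_cases h3 : pow2 m ≤ x
        · have hy : ¬ pow2 m ≤ y := fun h => h2 ⟨h3, h⟩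
          rw [show altStep (x, y, res) (m : Int)
                = (x - pow2 m, y, res + 2 * pow2 (2 * m)) by
            simp [altStep, hk, h1, h3, hy]]
          rw [ih]
          simp only [recurseNat, if_neg h1, if_neg h2, if_pos h3]
          ring
        · rw [show altStep (x, y, res) (m : Int)
                = (x, y - pow2 m, res + 3 * pow2 (2 * m)) by
            simp [altStep, hk, h1, h3]]
          rw [ih]
          simp only [recurseNat, if_neg h1, if_neg h2, if_neg h3]
          ring

-- ===== VERDICT (by name: the statement is the Claim_ definition above) =====
theorem recurse_spec : Claim_equal_recurse := by
  intro n x y _ hpre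
  show recurse n x y = recurse_alt n x y
  unfold recurse recurse_alt
  rw [show n - 1 = ((n.toNat : Int)) - 1 by rw [Int.toNat_of_nonneg hpre],
      foldl_altStep_eq n.toNat x y 0, zero_add]
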